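-- pv_equiv track=rewrite | github.com/marrinosnis/morse | src/services/BinaryCodeToMorseCode/bitsToMorseCode.py | findTransmissionRate
-- ===== SOURCE A (Python) =====
-- def findNumberOfBitsPerGroup(pos, bit, morseString):
--     size = 0
--     for index, value in enumerate(morseString[pos:], pos):
--         if value == bit:
--             size += 1
--         else:
--             break
--     return size, index
--
-- def findTransmissionRate(stringOfBits):
--     stringOfBits = stringOfBits.strip('0')  # remove possible zeroes from the beginning and end of the string
--     transmissionRate = 1  # the 'default' and correct transmission rate of the stringOfBits variable is: 1
--
--     sizeOfMorseBit, indexOfNextBit = findNumberOfBitsPerGroup(stringOfBits.find('1'), '1', stringOfBits)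
--     if sizeOfMorseBit == 2:
--         transmissionRate = 2
--
--     elif sizeOfMorseBit >= 3:  # if the size of the 1's bits is bigger than 2, I don't know if it has transmission rate or not e.g. if there are 3 1's at he beginning, is it dot'.' with transmissionRate==3, or is it dash "-" which has 3 1's for decoding?
--         toggle = False
--         sizeOfMorseBit2, indexOfNextBit2 = findNumberOfBitsPerGroup(indexOfNextBit, '0', stringOfBits)
--
--         while sizeOfMorseBit == sizeOfMorseBit2:
--             bit = '0' if toggle else '1'
--             sizeOfMorseBit2, indexOfNextBit2 = findNumberOfBitsPerGroup(indexOfNextBit2, bit, stringOfBits)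
--             toggle = not toggle
--
--         if sizeOfMorseBit2 == 0:
--             transmissionRate = sizeOfMorseBit
--
--         elif sizeOfMorseBit > sizeOfMorseBit2:
--             transmissionRate = sizeOfMorseBit2
--
--         elif sizeOfMorseBit < sizeOfMorseBit2:
--             transmissionRate = sizeOfMorseBit
--
--     return transmissionRate
-- ===== SOURCE B (Python) =====
-- def findTransmissionRate(stringOfBits):
--     # Arithmetic/pattern check: no run lists. After stripping, let t = suffix from the
--     # first '1' and S = length of its leading '1'-run. For S >= 3 the rate is decided by
--     # the FIRST index m where t deviates from the ideal S-periodic pattern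
--     # ('1'*S '0'*S '1'*S ...): m % S == 0 means the current run overran (or a foreign
--     # character appeared at a block boundary) -> rate S; otherwise the run ended early
--     # with length m % S < S -> rate m % S.  No deviation at all: the tail run has length
--     # len(t) % S (0 means all runs exact) -> rate len(t) % S or S.
--     s = stringOfBits.strip('0')
--     i = s.find('1')
--     if i < 0:
--         return 1
--     t = s[i:]
--     S = next((j for j, c in enumerate(t) if c != '1'), len(t))
--     if S == 2:
--         return 2
--     if S < 3:
--         return 1
--     m = next((j for j, c in enumerate(t)
--               if c != ('1' if (j // S) % 2 == 0 else '0')), None)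
--     if m is None:
--         r = len(t) % S
--         return r or S
--     q = m % S
--     return q or S
-- ===== Notes on version B (the rewrite author's own statement) =====
-- stated objective: alternative
-- what changed: B never builds or walks runs: after finding the leading 1-run length S it compares the string once against the ideal S-periodic pattern ('1'*S '0'*S ...) and derives the rate arithmetically from the first deviation index m (m % S, or S when m % S == 0, or len % S when there is no deviation), replacing A's stateful run-chasing helper and toggled while loop.
-- outside the precondition, e.g. on findTransmissionRate('0'): A raises UnboundLocalError, B returns 1; on findTransmissionRate('000'): A raises UnboundLocalError, B returns 1
import Mathlib
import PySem

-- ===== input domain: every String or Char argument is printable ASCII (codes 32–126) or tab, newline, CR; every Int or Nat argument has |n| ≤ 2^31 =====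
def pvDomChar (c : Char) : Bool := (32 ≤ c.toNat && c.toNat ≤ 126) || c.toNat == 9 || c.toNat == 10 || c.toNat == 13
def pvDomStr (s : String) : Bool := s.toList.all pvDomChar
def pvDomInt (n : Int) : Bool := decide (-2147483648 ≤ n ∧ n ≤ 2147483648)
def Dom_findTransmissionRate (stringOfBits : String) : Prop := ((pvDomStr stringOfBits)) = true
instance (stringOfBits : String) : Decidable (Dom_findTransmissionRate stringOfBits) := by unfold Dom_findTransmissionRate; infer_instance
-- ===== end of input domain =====

-- B replaces A's run-chasing helper and toggled while loop by one comparison of the string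
-- against the ideal S-periodic pattern, reading the rate off the first deviation index
-- arithmetically; objective: alternative algorithm, same O(n) cost.

-- ===== PORT A =====

-- loop body of findNumberOfBitsPerGroup: enumerate(morseString[pos:], pos); on the list's
-- end without a break, Python's `index` is the index of the LAST element, hence (size, i-1)
-- in the [] case (reached only after at least one element was consumed: fg matches [] to none).
def fgGo (bit : Char) : List Char → Int → Int → Int × Int
  | [], i, size => (size, i - 1)
  | x :: rest, i, size =>
      if x = bit then fgGo bit rest (i + 1) (size + 1) else (size, i)

-- findNumberOfBitsPerGroup; none = Python's UnboundLocalError (empty slice, index never bound)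
def fg (pos : Int) (bit : Char) (morse : List Char) : Option (Int × Int) :=
  match PySem.List.slice morse (some pos) none with
  | [] => none
  | x :: rest => some (fgGo bit (x :: rest) pos 0)

-- the while loop of findTransmissionRate: state (toggle, sizeOfMorseBit2, indexOfNextBit2);
-- fuel = |t| + 1 at the call site, proved sufficient below (fuel 0 / inner none unreachable under Pre_)
def aloop (t : List Char) (S : Int) : Nat → Bool → Int → Int → Int
  | 0, _, s2, _ => s2
  | fuel + 1, toggle, s2, pos2 =>
      if s2 = S then
        match fg pos2 (if toggle then '0' else '1') t with
        | none => s2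
        | some (s2', p') => aloop t S fuel (!toggle) s2' p'
      else s2

def findTransmissionRate (stringOfBits : String) : Int :=
  let s := PySem.Str.stripChars stringOfBits "0"
  let t := s.toList
  match fg (PySem.Str.find s "1") '1' t with
  | none => 1      -- Python raises UnboundLocalError here; excluded by Pre_
  | some (S, idx) =>
    if S = 2 then 2
    else if 3 ≤ S then
      match fg idx '0' t with
      | none => 1  -- unreachable under Pre_
      | some (S2, idx2) =>
        let S2f := aloop t S (t.length + 1) false S2 idx2
        if S2f = 0 then S
        else if S2f < S then S2f
        else if S < S2f then S
        else 1
    else 1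

-- ===== PORT B =====

-- next((j for j, c in enumerate(t) if c != '1'), len(t))
def bFind1 : List Char → Nat
  | [] => 0
  | c :: xs => if c ≠ '1' then 0 else bFind1 xs + 1

-- next((j for j, c in enumerate(t) if c != ('1' if (j // S) % 2 == 0 else '0')), None)
def bFindPat (S : Int) : List Char → Int → Option Int
  | [], _ => none
  | c :: xs, j =>
      if c ≠ (if PySem.Int.mod (PySem.Int.floordiv j S) 2 = 0 then '1' else '0')
      then some j else bFindPat S xs (j + 1)

def findTransmissionRate_alt (stringOfBits : String) : Int :=
  let s := PySem.Str.stripChars stringOfBits "0"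
  let i := PySem.Str.find s "1"
  if i < 0 then 1
  else
    let t := PySem.List.slice s.toList (some i) none
    let S : Int := ((bFind1 t : Nat) : Int)
    if S = 2 then 2
    else if S < 3 then 1
    else
      match bFindPat S t 0 with
      | none =>
          let r := PySem.Int.mod (t.length : Int) S
          if r = 0 then S else r      -- Python's `r or S`
      | some m =>
          let q := PySem.Int.mod m S
          if q = 0 then S else q      -- Python's `q or S`

-- ===== PRECONDITION & SPEC =====
-- Pre_ excludes exactly the strings consisting only of '0' (incl. ""): there A's helper runs on
-- the empty stripped string and raises UnboundLocalError, returning no value.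
def Pre_findTransmissionRate (stringOfBits : String) : Prop :=
  (stringOfBits.toList.any (fun c => !(c == '0'))) = true
instance (stringOfBits : String) : Decidable (Pre_findTransmissionRate stringOfBits) := by
  unfold Pre_findTransmissionRate; infer_instance

def pvWitness_findTransmissionRate : String := "0011100111000"

def Spec_findTransmissionRate (stringOfBits : String) (out : Int) : Prop :=
  out = findTransmissionRate_alt stringOfBits
instance (stringOfBits : String) (out : Int) : Decidable (Spec_findTransmissionRate stringOfBits out) := by
  unfold Spec_findTransmissionRate; infer_instance

-- ===== CLAIM (what is proved, stated in full; the proofs are below) =====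
def Claim_equal_findTransmissionRate : Prop := ∀ (stringOfBits : String), Dom_findTransmissionRate stringOfBits → Pre_findTransmissionRate stringOfBits → Spec_findTransmissionRate stringOfBits (findTransmissionRate stringOfBits)

-- ===== LEMMAS AND PROOFS =====

-- length of the leading run of b in u
def countL (b : Char) (u : List Char) : Nat := (u.takeWhile (fun c => decide (c = b))).length

lemma countL_le (b : Char) (u : List Char) : countL b u ≤ u.length :=
  (List.takeWhile_prefix _).length_le

lemma countL_cons (b c : Char) (xs : List Char) :
    countL b (c :: xs) = if c = b then countL b xs + 1 else 0 := by
  by_cases h : c = b <;> simp [countL, List.takeWhile_cons, h]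

lemma drop_countL (b : Char) (u : List Char) :
    u.drop (countL b u) = u.dropWhile (fun c => decide (c = b)) := by
  induction u with
  | nil => simp [countL]
  | cons c xs ih =>
    by_cases h : c = b
    · rw [countL_cons, if_pos h, List.dropWhile_cons_of_pos (by simp [h]), List.drop_succ_cons, ih]
    · rw [countL_cons, if_neg h, List.dropWhile_cons_of_neg (by simp [h]), List.drop_zero]

lemma countL_all (b : Char) (u : List Char) (h : countL b u = u.length) :
    ∀ x ∈ u, x = b := by
  intro x hx
  have hpre := List.takeWhile_prefix (l := u) (fun c => decide (c = b))
  have heq : u.takeWhile (fun c => decide (c = b)) = u := hpre.eq_of_length h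
  have := List.mem_takeWhile_imp (l := u) (p := fun c => decide (c = b)) (heq ▸ hx)
  simpa using this

lemma take_countL (b : Char) (u : List Char) :
    u.take (countL b u) = List.replicate (countL b u) b := by
  have hpre := List.takeWhile_prefix (l := u) (p := fun c => decide (c = b))
  have ht : u.take (countL b u) = u.takeWhile (fun c => decide (c = b)) :=
    (List.prefix_iff_eq_take.mp hpre).symm
  rw [ht]
  apply List.eq_replicate_of_mem
  intro x hx
  simpa using List.mem_takeWhile_imp (l := u) (p := fun c => decide (c = b)) hx

lemma tog_ne (b : Char) : (if b = '0' then '1' else '0') ≠ b := by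
  by_cases h : b = '0' <;> simp [h]
  intro hb; exact h hb.symm

-- the value A's while loop leaves in sizeOfMorseBit2, computed on the suffix run structure
def ideal (S : Int) (u : List Char) (b : Char) : Int :=
  if h : ((countL b u : Int) = S ∧ countL b u ≠ 0 ∧ countL b u ≠ u.length) then
    ideal S (u.drop (countL b u)) (if b = '0' then '1' else '0')
  else if (countL b u : Int) = S then 0 else (countL b u : Int)
termination_by u.length
decreasing_by
  have := countL_le b u
  have h1 := h.2.1
  have h2 := h.2.2
  simp [List.length_drop]
  omega

-- A's final four-way branch on the loop's exit value, as a function of ideal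
def Fval (S : Int) (u : List Char) (b : Char) : Int :=
  if ideal S u b = 0 then S else if ideal S u b < S then ideal S u b else S

lemma ideal_ne_self (S : Int) (hS : 3 ≤ S) : ∀ (n : Nat) (u : List Char) (b : Char),
    u.length ≤ n → ideal S u b ≠ S := by
  intro n
  induction n with
  | zero =>
    intro u b hu
    have : u = [] := List.length_eq_zero_iff.mp (by omega)
    subst this
    rw [ideal]; simp [countL]; omega
  | succ n ih =>
    intro u b hu
    rw [ideal]
    split
    · rename_i h
      exact ih _ _ (by have := countL_le b u; have := h.2.1; simp [List.length_drop]; omega)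
    · split
      · omega
      · assumption

lemma fgGo_spec (b : Char) : ∀ (u : List Char) (i s : Int),
    fgGo b u i s = (s + countL b u,
      if countL b u = u.length then i + countL b u - 1 else i + countL b u) := by
  intro u
  induction u with
  | nil => intro i s; simp [fgGo, countL]
  | cons x rest ih =>
    intro i s
    by_cases hx : x = b
    · subst hx
      rw [fgGo, if_pos rfl, ih, countL_cons, if_pos rfl]
      have hle := countL_le x rest
      by_cases h : countL x rest = rest.length
      · simp only [h]
        simp [Prod.ext_iff]
        constructor <;> push_cast <;> omega
      · have h2 : ¬ (countL x rest + 1 = rest.length + 1) := by omega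
        simp only [List.length_cons, h, h2, if_neg]
        simp [Prod.ext_iff]
        constructor <;> push_cast <;> omega
    · rw [fgGo, if_neg hx, countL_cons, if_neg hx]
      have : ¬ ((0 : Nat) = rest.length + 1) := by omega
      simp [this]

lemma fg_spec (t : List Char) (pos : Nat) (b : Char) (hpos : pos < t.length) :
    fg (pos : Int) b t = some ((countL b (t.drop pos) : Int),
      if countL b (t.drop pos) = (t.drop pos).length
        then (pos : Int) + countL b (t.drop pos) - 1
        else (pos : Int) + countL b (t.drop pos)) := by
  have hslice : PySem.List.slice t (some (pos : Int)) none = t.drop pos := by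
    rw [PySem.List.slice_from t (by positivity)]
    simp
  have hne : t.drop pos ≠ [] := by
    simp [List.drop_eq_nil_iff]; omega
  rw [fg]
  rcases hdrop : t.drop pos with _ | ⟨x, rest⟩
  · exact absurd hdrop hne
  · rw [hslice, hdrop]
    simp only [fgGo_spec b (x :: rest) (pos : Int) 0]
    rw [zero_add]

-- A's while loop computes `ideal` on the suffix after the run just scanned
lemma aloop_eq (t : List Char) (S : Int) (hS : 3 ≤ S) : ∀ (fuel : Nat) (u : List Char)
    (pos : Nat) (b : Char) (tog : Bool),
    t.drop pos = u → u ≠ [] → u.length ≤ fuel →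
    ((if tog then '0' else '1') = (if b = '0' then '1' else '0')) →
    aloop t S fuel tog ((countL b u : Int))
      (if countL b u = u.length then (pos : Int) + countL b u - 1 else (pos : Int) + countL b u)
      = ideal S u b := by
  intro fuel
  induction fuel with
  | zero =>
    intro u pos b tog hdrop hne hlen _
    exact absurd (List.length_eq_zero_iff.mp (by omega)) hne
  | succ fuel ih =>
    intro u pos b tog hdrop hne hlen hbit
    set k := countL b u with hk
    by_cases hkS : (k : Int) = S
    · have hk3 : 3 ≤ k := by omega
      have hkle : k ≤ u.length := countL_le b u
      have hlenpos : pos + u.length = t.length := by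
        have := List.length_drop (l := t) (i := pos)
        rw [hdrop] at this
        have hple : pos ≤ t.length := by
          by_contra hc
          have hd : t.drop pos = [] := List.drop_eq_nil_of_le (by omega)
          rw [hd] at hdrop
          exact hne hdrop.symm
        omega
      by_cases hkl : k = u.length
      · -- run reaches the end of the string: next scan returns 0
        rw [if_pos hkl]
        rw [aloop, if_pos hkS]
        have hp1 : (pos : Int) + (k : Int) - 1 = ((pos + k - 1 : Nat) : Int) := by
          push_cast; omega
        rw [hp1]
        have hlt : pos + k - 1 < t.length := by omega
        have hdrop1 : t.drop (pos + k - 1) = [u.getLast hne] := by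
          have h1 : pos + k - 1 = pos + (k - 1) := by omega
          rw [h1, ← List.drop_drop, hdrop]
          have : u.length - 1 = k - 1 := by omega
          rw [← this]
          exact List.drop_length_sub_one hne
        have hlastb : u.getLast hne = b := countL_all b u hkl _ (List.getLast_mem hne)
        have hbitne : (if tog then '0' else '1') ≠ b := by rw [hbit]; exact tog_ne b
        rw [fg_spec t (pos + k - 1) _ hlt]
        dsimp only
        rw [hdrop1]
        have hc0 : countL (if tog then '0' else '1') [u.getLast hne] = 0 := by
          rw [countL_cons]
          rw [if_neg (by rw [hlastb]; intro h; exact hbitne h.symm)]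
        rw [hc0]
        simp only [Nat.cast_zero, List.length_singleton]
        rw [if_neg (by omega)]
        rcases fuel with _ | fuel
        · omega
        · rw [aloop, if_neg (by omega)]
          rw [ideal]
          rw [dif_neg (by push_neg; intro _ _; exact hkl)]
          rw [if_pos hkS]
      · -- run is followed by more characters: recurse
        rw [if_neg hkl]
        rw [aloop, if_pos hkS]
        have hp : (pos : Int) + (k : Int) = ((pos + k : Nat) : Int) := by push_cast; ring
        rw [hp]
        have hlt : pos + k < t.length := by omega
        set v := u.drop k with hv
        have hvne : v ≠ [] := by
          simp [hv, List.drop_eq_nil_iff]; omega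
        have hdropv : t.drop (pos + k) = v := by
          rw [← List.drop_drop, hdrop]
        rw [fg_spec t (pos + k) (if tog then '0' else '1') hlt]
        dsimp only
        rw [hdropv]
        rw [ih v (pos + k) (if tog then '0' else '1') (!tog) hdropv hvne
          (by have : v.length = u.length - k := by simp [hv]
              have hk1 : 1 ≤ k := by omega
              omega)
          (by cases tog <;> decide)]
        conv_rhs => rw [ideal]
        rw [dif_pos ⟨hkS, by omega, hkl⟩]
        rw [hbit]
    · -- run length differs from S: the loop exits with this value
      rw [aloop, if_neg hkS]
      rw [ideal, dif_neg (by push_neg; intro h; exact absurd h hkS), if_neg hkS]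

-- ===== B-side lemmas =====

lemma bFind1_eq : ∀ (u : List Char), bFind1 u = countL '1' u := by
  intro u
  induction u with
  | nil => simp [bFind1, countL]
  | cons c xs ih =>
    by_cases h : c = '1' <;> simp [bFind1, countL_cons, h, ih]

-- the ideal pattern character at (Nat) index j, blocks of length SN starting with '1'
def pat (SN : Nat) (j : Nat) : Char := if (j / SN) % 2 = 0 then '1' else '0'

-- bFindPat's Int-arithmetic expected character IS `pat` on Nat indices
lemma patI (SN jn : Nat) :
    (if PySem.Int.mod (PySem.Int.floordiv ((jn : Nat) : Int) ((SN : Nat) : Int)) 2 = 0 then '1' else '0')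
    = pat SN jn := by
  have hf := PySem.Int.floordiv_natCast jn SN
  have hm := PySem.Int.mod_natCast (jn / SN) 2
  have h2 : (((2 : Nat)) : Int) = (2 : Int) := by norm_num
  rw [hf, ← h2, hm]
  unfold pat
  by_cases h : (jn / SN) % 2 = 0
  · rw [if_pos (by exact_mod_cast h), if_pos h]
  · rw [if_neg (by exact_mod_cast h), if_neg h]

lemma pat_block (SN : Nat) (hS : 0 < SN) (jn s : Nat) (hj : jn % SN = 0) (hs : s < SN) :
    pat SN (jn + s) = pat SN jn := by
  obtain ⟨q, hq⟩ := Nat.dvd_of_mod_eq_zero hj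
  subst hq
  unfold pat
  rw [Nat.mul_add_div hS, Nat.div_eq_of_lt hs, Nat.mul_div_cancel_left _ hS]
  simp

lemma pat_flip (SN : Nat) (hS : 0 < SN) (jn : Nat) (hj : jn % SN = 0) :
    pat SN (jn + SN) = (if pat SN jn = '0' then '1' else '0') := by
  obtain ⟨q, hq⟩ := Nat.dvd_of_mod_eq_zero hj
  subst hq
  unfold pat
  have h1 : (SN * q + SN) / SN = q + 1 := by
    rw [Nat.mul_add_div hS, Nat.div_self hS]
  rw [h1, Nat.mul_div_cancel_left _ hS]
  rcases Nat.even_or_odd q with he | ho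
  · have h2 : q % 2 = 0 := Nat.even_iff.mp he
    have h3 : (q + 1) % 2 = 1 := by omega
    simp [h2, h3]
  · have h2 : q % 2 = 1 := Nat.odd_iff.mp ho
    have h3 : (q + 1) % 2 = 0 := by omega
    simp [h2, h3]

-- scanning past r in-pattern characters of b
lemma bFindPat_skip (SN : Nat) (b : Char) : ∀ (r : Nat) (v : List Char) (jn : Nat),
    (∀ s : Nat, s < r → pat SN (jn + s) = b) →
    bFindPat (SN : Int) (List.replicate r b ++ v) ((jn : Nat) : Int)
      = bFindPat (SN : Int) v (((jn + r : Nat)) : Int) := by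
  intro r
  induction r with
  | zero => intro v jn _; simp
  | succ r ih =>
    intro v jn h
    rw [List.replicate_succ, List.cons_append, bFindPat, patI]
    have h0 : pat SN jn = b := by simpa using h 0 (by omega)
    rw [if_neg (by simp [h0])]
    have hcast : ((jn : Nat) : Int) + 1 = (((jn + 1 : Nat)) : Int) := by push_cast; ring
    rw [hcast, ih v (jn + 1) (fun s hs => by
      have := h (s + 1) (by omega)
      rw [← this]; ring_nf)]
    congr 1
    push_cast; ring

-- B's branch on the deviation search, as one function (the match in findTransmissionRate_alt)
def Bval (SN : Nat) (u : List Char) (jn : Nat) : Int :=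
  match bFindPat ((SN : Nat) : Int) u ((jn : Nat) : Int) with
  | none =>
      if PySem.Int.mod (((jn + u.length : Nat)) : Int) ((SN : Nat) : Int) = 0 then ((SN : Nat) : Int)
      else PySem.Int.mod (((jn + u.length : Nat)) : Int) ((SN : Nat) : Int)
  | some m =>
      if PySem.Int.mod m ((SN : Nat) : Int) = 0 then ((SN : Nat) : Int)
      else PySem.Int.mod m ((SN : Nat) : Int)

lemma drop_countL_head (b c : Char) (u v : List Char) (h : u.drop (countL b u) = c :: v) :
    c ≠ b := by
  rw [drop_countL] at h
  have hne : u.dropWhile (fun x => decide (x = b)) ≠ [] := by simp [h]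
  have h2 := List.head_dropWhile_not (p := fun x => decide (x = b)) (l := u) hne
  have h3 : (u.dropWhile (fun x => decide (x = b))).head hne = c := by simp [h]
  rw [h3] at h2
  simpa using h2

-- the heart of the proof: B's pattern-deviation arithmetic equals A's loop-exit branch Fval
lemma bPat_eq_F (SN : Nat) (hS : 3 ≤ SN) : ∀ (n : Nat) (u : List Char) (jn : Nat) (b : Char),
    u.length ≤ n → jn % SN = 0 → pat SN jn = b →
    Bval SN u jn = Fval ((SN : Nat) : Int) u b := by
  intro n
  induction n with
  | zero =>
    intro u jn b hu hj hb
    have hu0 : u = [] := List.length_eq_zero_iff.mp (by omega)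
    subst hu0
    unfold Bval
    rw [show bFindPat ((SN : Nat) : Int) [] ((jn : Nat) : Int) = none from rfl]
    dsimp only
    rw [PySem.Int.mod_natCast]
    have h0 : (jn + ([] : List Char).length) % SN = 0 := by simpa using hj
    rw [h0, if_pos (by norm_num)]
    have hc0 : countL b [] = 0 := rfl
    rw [Fval, ideal, dif_neg (by rw [hc0]; rintro ⟨-, h2, -⟩; exact h2 rfl), hc0,
        if_neg (show ¬ (((0 : Nat) : Int) = ((SN : Nat) : Int)) by
          exact_mod_cast (by omega : (0 : Nat) ≠ SN))]
    norm_num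
  | succ n ih =>
    intro u jn b hu hj hb
    have hSN0 : 0 < SN := by omega
    set k := countL b u with hk
    have hkle : k ≤ u.length := countL_le b u
    have hsplit : u = List.replicate k b ++ u.drop k := by
      conv_lhs => rw [← List.take_append_drop k u]
      rw [hk, take_countL]
    have hmodr : ∀ r : Nat, (jn + r) % SN = r % SN := by
      intro r
      rw [Nat.add_mod, hj, Nat.zero_add, Nat.mod_mod]
    rcases Nat.lt_trichotomy k SN with hklt | hkeq | hkgt
    · -- k < SN : the run of b ends (or the list ends) inside the first block
      have hkS : (((k : Nat)) : Int) ≠ ((SN : Nat) : Int) := by exact_mod_cast Nat.ne_of_lt hklt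
      have hIdeal : ideal ((SN : Nat) : Int) u b = ((k : Nat) : Int) := by
        rw [ideal, dif_neg (fun hh => hkS hh.1), if_neg hkS]
      have hFval : Fval ((SN : Nat) : Int) u b =
          (if k = 0 then ((SN : Nat) : Int) else ((k : Nat) : Int)) := by
        rw [Fval, hIdeal]
        by_cases hk0 : k = 0
        · simp [hk0]
        · rw [if_neg (by exact_mod_cast hk0), if_pos (by exact_mod_cast hklt), if_neg hk0]
      rcases hv : u.drop k with _ | ⟨c, v'⟩
      · -- the list ends with the run
        have hlen : u.length = k := by
          have hld := List.length_drop (l := u) (i := k)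
          rw [hv] at hld
          simp at hld
          omega
        have hfind : bFindPat ((SN : Nat) : Int) u ((jn : Nat) : Int) = none := by
          conv_lhs => rw [hsplit, hv]
          rw [List.append_nil, show (List.replicate k b : List Char) = List.replicate k b ++ [] by simp]
          rw [bFindPat_skip SN b k [] jn
            (fun s hs => by rw [pat_block SN hSN0 jn s hj (by omega), hb])]
          rfl
        unfold Bval
        rw [hfind]
        dsimp only
        rw [PySem.Int.mod_natCast, hlen, hmodr, Nat.mod_eq_of_lt hklt, hFval]
        by_cases hk0 : k = 0
        · rw [if_pos (by exact_mod_cast hk0), if_pos hk0]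
        · rw [if_neg (by exact_mod_cast hk0), if_neg hk0]
      · -- a character c ≠ b follows: deviation at index jn + k
        have hcb : c ≠ b := drop_countL_head b c u v' (by rw [← hk]; exact hv)
        have hfind : bFindPat ((SN : Nat) : Int) u ((jn : Nat) : Int) =
            some (((jn + k : Nat)) : Int) := by
          conv_lhs => rw [hsplit, hv]
          rw [bFindPat_skip SN b k (c :: v') jn
            (fun s hs => by rw [pat_block SN hSN0 jn s hj (by omega), hb])]
          rw [bFindPat, patI, pat_block SN hSN0 jn k hj hklt, hb]
          rw [if_pos (by simpa using hcb)]
        unfold Bval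
        rw [hfind]
        dsimp only
        rw [PySem.Int.mod_natCast, hmodr, Nat.mod_eq_of_lt hklt, hFval]
        by_cases hk0 : k = 0
        · rw [if_pos (by exact_mod_cast hk0), if_pos hk0]
        · rw [if_neg (by exact_mod_cast hk0), if_neg hk0]
    · -- k = SN : a full block of b
      have hkS : (((k : Nat)) : Int) = ((SN : Nat) : Int) := by exact_mod_cast hkeq
      rcases hv : u.drop k with _ | ⟨c, v'⟩
      · -- the block is the whole list: no deviation, len % S == 0
        have hlen : u.length = k := by
          have hld := List.length_drop (l := u) (i := k)
          rw [hv] at hld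
          simp at hld
          omega
        have hfind : bFindPat ((SN : Nat) : Int) u ((jn : Nat) : Int) = none := by
          conv_lhs => rw [hsplit, hv]
          rw [List.append_nil, show (List.replicate k b : List Char) = List.replicate k b ++ [] by simp]
          rw [bFindPat_skip SN b k [] jn
            (fun s hs => by rw [pat_block SN hSN0 jn s hj (by rw [hkeq] at hs; omega), hb])]
          rfl
        unfold Bval
        rw [hfind]
        dsimp only
        rw [PySem.Int.mod_natCast, hlen, hmodr, hkeq, Nat.mod_self, if_pos (by norm_num)]
        rw [Fval, ideal, dif_neg (fun hh => hh.2.2 (by omega)), if_pos hkS]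
        simp
      · -- more follows: both sides step to the next block
        have hklen : k < u.length := by
          have hld := List.length_drop (l := u) (i := k)
          rw [hv] at hld
          simp at hld
          omega
        have hfind : bFindPat ((SN : Nat) : Int) u ((jn : Nat) : Int) =
            bFindPat ((SN : Nat) : Int) (u.drop k) (((jn + SN : Nat)) : Int) := by
          conv_lhs => rw [hsplit]
          rw [bFindPat_skip SN b k (u.drop k) jn
            (fun s hs => by rw [pat_block SN hSN0 jn s hj (by omega), hb])]
          rw [hkeq]
        have hstep : Bval SN u jn = Bval SN (u.drop k) (jn + SN) := by
          unfold Bval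
          rw [hfind]
          have hlu : jn + u.length = (jn + SN) + (u.drop k).length := by
            have := List.length_drop (l := u) (i := k)
            omega
          rw [hlu]
        rw [hstep]
        have hflip : pat SN (jn + SN) = (if b = '0' then '1' else '0') := by
          rw [pat_flip SN hSN0 jn hj, hb]
        rw [ih (u.drop k) (jn + SN) (if b = '0' then '1' else '0')
          (by have := List.length_drop (l := u) (i := k); omega)
          (by rw [Nat.add_mod_right]; exact hj) hflip]
        have hIdeal : ideal ((SN : Nat) : Int) u b =
            ideal ((SN : Nat) : Int) (u.drop k) (if b = '0' then '1' else '0') := by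
          conv_lhs => rw [ideal]
          rw [dif_pos ⟨hkS, by omega, by omega⟩]
        rw [Fval, Fval, hIdeal]
    · -- k > SN : the run of b overruns the block boundary: deviation at jn + SN
      have hkS : (((k : Nat)) : Int) ≠ ((SN : Nat) : Int) := by
        exact_mod_cast Nat.ne_of_gt hkgt
      have htake : u.take SN = List.replicate SN b := by
        have h1 : u.take SN = (u.take k).take SN := by
          rw [List.take_take, min_eq_left (by omega)]
        rw [h1, hk, take_countL, List.take_replicate, min_eq_left (by omega)]
      have hdropSN : u.drop SN = b :: (List.replicate (k - SN - 1) b ++ u.drop k) := by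
        conv_lhs => rw [hsplit]
        rw [List.drop_append_of_le_length (by simp; omega), List.drop_replicate]
        have : k - SN = (k - SN - 1) + 1 := by omega
        rw [this, List.replicate_succ]
        simp
      have hbne : (if b = '0' then '1' else '0') ≠ b := tog_ne b
      have hfind : bFindPat ((SN : Nat) : Int) u ((jn : Nat) : Int) =
          some (((jn + SN : Nat)) : Int) := by
        conv_lhs => rw [← List.take_append_drop SN u, htake, hdropSN]
        rw [bFindPat_skip SN b SN (b :: (List.replicate (k - SN - 1) b ++ u.drop k)) jn
          (fun s hs => by rw [pat_block SN hSN0 jn s hj hs, hb])]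
        rw [bFindPat, patI, pat_flip SN hSN0 jn hj, hb]
        rw [if_pos (by simpa using fun hh => hbne hh.symm)]
      unfold Bval
      rw [hfind]
      dsimp only
      rw [PySem.Int.mod_natCast, hmodr, Nat.mod_self, if_pos (by norm_num)]
      rw [Fval, ideal, dif_neg (fun hh => hkS hh.1), if_neg hkS]
      rw [if_neg (by exact_mod_cast (by omega : k ≠ 0)), if_neg (by exact_mod_cast (by omega : ¬ k < SN))]

lemma strip_ne_nil (s : String) (h : Pre_findTransmissionRate s) :
    (PySem.Str.stripChars s "0").toList ≠ [] := by
  intro hnil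
  rw [PySem.Str.toList_stripChars] at hnil
  unfold PySem.Chars.stripChars at hnil
  simp only [List.reverse_eq_nil_iff] at hnil
  have h1 := List.dropWhile_eq_nil_iff.mp hnil
  unfold Pre_findTransmissionRate at h
  simp only [List.any_eq_true, Bool.not_eq_true', beq_eq_false_iff_ne, ne_eq] at h
  obtain ⟨c, hc, hne⟩ := h
  have hsplit := List.takeWhile_append_dropWhile (p := fun c => ("0".toList).contains c) (l := s.toList)
  rw [← hsplit] at hc
  rcases List.mem_append.mp hc with hm | hm
  · have := List.mem_takeWhile_imp hm
    simp at this
    exact hne this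
  · have := h1 c (by simpa using hm)
    simp at this
    exact hne this

set_option maxHeartbeats 2000000 in
theorem findTransmissionRate_spec : Claim_equal_findTransmissionRate := by
  intro s _ hpre
  unfold Spec_findTransmissionRate findTransmissionRate findTransmissionRate_alt
  have htoList1 : ("1" : String).toList = ['1'] := rfl
  simp only [PySem.Str.find_eq, htoList1]
  set t : List Char := (PySem.Str.stripChars s "0").toList with ht
  have htne : t ≠ [] := strip_ne_nil s hpre
  by_cases hneg : PySem.Chars.find t ['1'] < 0
  · -- no '1' in the stripped string: both return 1
    have hm1 : PySem.Chars.find t ['1'] = -1 := by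
      have := PySem.Chars.neg_one_le_find (s := t) (sub := ['1'])
      omega
    have hno1 : ¬ ['1'] <:+: t := (PySem.Chars.find_eq_neg_one_iff t ['1']).mp hm1
    have hlast : t.getLast htne ≠ '1' := by
      intro hEq
      exact hno1 ((List.singleton_infix_iff '1' t).mpr (hEq ▸ List.getLast_mem htne))
    rw [hm1]
    have hslice : PySem.List.slice t (some (-1)) none = [t.getLast htne] := by
      rw [PySem.List.slice_from_neg_one, List.drop_length_sub_one htne]
    rw [fg, hslice]
    dsimp only
    rw [fgGo_spec]
    rw [countL_cons, if_neg (fun h => hlast h)]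
    dsimp only
    norm_num
  · -- '1' occurs: both read the same first-run length and suffix structure
    have hfge : 0 ≤ PySem.Chars.find t ['1'] := by omega
    set pos : Nat := (PySem.Chars.find t ['1']).toNat with hposdef
    have hcast : PySem.Chars.find t ['1'] = (pos : Int) := (Int.toNat_of_nonneg hfge).symm
    obtain ⟨hprefix, -⟩ := PySem.Chars.find_spec (s := t) (sub := ['1']) hfge
    obtain ⟨tail, hdrop⟩ : ∃ tail, t.drop pos = '1' :: tail := by
      obtain ⟨r, hr⟩ := hprefix
      exact ⟨r, by simpa using hr.symm⟩
    have hposlt : pos < t.length := by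
      by_contra hc
      rw [List.drop_eq_nil_of_le (by omega)] at hdrop
      simp at hdrop
    have hlenposs : pos + (t.drop pos).length = t.length := by
      have := List.length_drop (l := t) (i := pos)
      omega
    set u0 : List Char := t.drop pos with hu0
    set k1 : Nat := countL '1' u0 with hk1def
    have hk1c : countL '1' u0 = countL '1' tail + 1 := by
      rw [hdrop, countL_cons, if_pos rfl]
    have hk1pos : 1 ≤ k1 := by omega
    rw [hcast, fg_spec t pos '1' hposlt]
    dsimp only
    simp only [← hu0]
    simp only [← hk1def]
    rw [if_neg (show ¬((pos : Int) < 0) by omega)]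
    -- B side: the slice is u0, its leading 1-run is k1
    have hsliceB : PySem.List.slice t (some ((pos : Nat) : Int)) none = u0 := by
      rw [PySem.List.slice_from t (Int.natCast_nonneg pos)]
      simp only [Int.toNat_natCast]
      exact hu0.symm
    rw [hsliceB, bFind1_eq]
    simp only [← hk1def]
    by_cases hS2 : ((k1 : Nat) : Int) = 2
    · rw [if_pos hS2, if_pos hS2]
    · rw [if_neg hS2, if_neg hS2]
      by_cases hS3 : 3 ≤ ((k1 : Nat) : Int)
      · rw [if_pos hS3, if_neg (show ¬(((k1 : Nat) : Int) < 3) by omega)]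
        have hS3n : 3 ≤ k1 := by exact_mod_cast hS3
        -- the whole B branch is Bval k1 u0 0, which equals Fval by the main lemma
        have hB : Bval k1 u0 0 = Fval ((k1 : Nat) : Int) u0 '1' :=
          bPat_eq_F k1 hS3n u0.length u0 0 '1' le_rfl (Nat.zero_mod _)
            (by unfold pat; norm_num)
        have hBexpr : (match bFindPat ((k1 : Nat) : Int) u0 0 with
            | none =>
                if PySem.Int.mod ((u0.length : Nat) : Int) ((k1 : Nat) : Int) = 0
                then ((k1 : Nat) : Int)
                else PySem.Int.mod ((u0.length : Nat) : Int) ((k1 : Nat) : Int)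
            | some m =>
                if PySem.Int.mod m ((k1 : Nat) : Int) = 0 then ((k1 : Nat) : Int)
                else PySem.Int.mod m ((k1 : Nat) : Int))
            = Fval ((k1 : Nat) : Int) u0 '1' := by
          rw [← hB]
          unfold Bval
          simp only [Nat.cast_zero, Nat.zero_add]
        rw [hBexpr]
        -- A side
        by_cases hkl : k1 = u0.length
        · -- the run of 1's reaches the end of the string: A yields S, Fval yields S
          rw [if_pos hkl]
          have hp1 : (pos : Int) + (k1 : Int) - 1 = ((pos + k1 - 1 : Nat) : Int) := by
            push_cast; omega
          rw [hp1, fg_spec t (pos + k1 - 1) '0' (by omega)]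
          dsimp only
          have hdrop1 : t.drop (pos + k1 - 1) = [u0.getLast (by rw [hdrop]; exact List.cons_ne_nil _ _)] := by
            have h1 : pos + k1 - 1 = pos + (k1 - 1) := by omega
            rw [h1, ← List.drop_drop, ← hu0]
            have h2 : u0.length - 1 = k1 - 1 := by omega
            rw [← h2]
            exact List.drop_length_sub_one _
          have hlast1 : u0.getLast (by rw [hdrop]; exact List.cons_ne_nil _ _) = '1' :=
            countL_all '1' u0 hkl _ (List.getLast_mem _)
          rw [hdrop1]
          have hc0 : countL '0' [u0.getLast (by rw [hdrop]; exact List.cons_ne_nil _ _)] = 0 := by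
            rw [countL_cons, if_neg (by rw [hlast1]; decide)]
          rw [hc0]
          rw [if_neg (show ¬((0 : Nat) = [u0.getLast (by rw [hdrop]; exact List.cons_ne_nil _ _)].length) by simp)]
          rw [aloop, if_neg (show ¬(((0 : Nat) : Int) = (k1 : Int)) by push_cast; omega)]
          rw [if_pos (show (((0 : Nat) : Int)) = 0 by norm_num)]
          rw [Fval, ideal, dif_neg (by rintro ⟨-, -, h3⟩; exact h3 (hk1def ▸ hkl)),
              ← hk1def, if_pos rfl, if_pos rfl]
        · -- more characters follow the run of 1's: A's loop value is ideal, Fval folds it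
          rw [if_neg hkl]
          have hvne : u0.drop k1 ≠ [] := by
            have hle := countL_le '1' u0
            simp [List.drop_eq_nil_iff]
            omega
          have hp : (pos : Int) + (k1 : Int) = ((pos + k1 : Nat) : Int) := by push_cast; ring
          rw [hp, fg_spec t (pos + k1) '0' (by have := countL_le '1' u0; omega)]
          dsimp only
          have hdropv : t.drop (pos + k1) = u0.drop k1 := by
            rw [← List.drop_drop, ← hu0]
          rw [hdropv]
          rw [aloop_eq t (k1 : Int) hS3 (t.length + 1) (u0.drop k1) (pos + k1) '0' false
            hdropv hvne (by have := (List.length_drop (l := u0) (i := k1)); have := countL_le '1' u0; omega)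
            (by decide)]
          have hnself := ideal_ne_self (k1 : Int) hS3 (u0.drop k1).length (u0.drop k1) '0' le_rfl
          have hIdeal : ideal ((k1 : Nat) : Int) u0 '1' = ideal ((k1 : Nat) : Int) (u0.drop k1) '0' := by
            conv_lhs => rw [ideal]
            rw [dif_pos ⟨by rw [← hk1def], by omega, by rw [← hk1def]; exact hkl⟩, ← hk1def,
                if_neg (show ¬('1' = '0') by decide)]
          rw [Fval, hIdeal]
          set f := ideal ((k1 : Nat) : Int) (u0.drop k1) '0' with hf
          by_cases hf0 : f = 0
          · rw [if_pos hf0, if_pos hf0]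
          · rw [if_neg hf0, if_neg hf0]
            rcases lt_trichotomy f ((k1 : Nat) : Int) with hlt | heq | hgt
            · rw [if_pos hlt, if_pos hlt]
            · exact absurd heq hnself
            · rw [if_neg (by omega), if_pos (by omega), if_neg (by omega)]
      · rw [if_neg hS3, if_pos (by omega)]
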